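-- pv_equiv track=rewrite | github.com/liuderwhat/hacker_rank | Collections/Piling Up.py | is_cude
-- ===== SOURCE A (Python) =====
-- def is_cude(c):
--
--     head, last = 0, len(c) - 1
--     current = max([c[0], c[-1]])
--
--     if current == c[0]:
--         head += 1
--     else:
--         last -= 1
--
--     for _ in range(len(c)-1):
--
--         if c[head] > current or c[last] > current:
--             return 'No'
--         else :
--             if c[head] >= c[last]:
--                 current = c[head]
--                 head += 1
--             else:
--                 current = c[last]
--                 last -= 1
--
--     return 'Yes'
-- ===== SOURCE B (Python) =====
-- def is_cude(c):
--     n = len(c)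
--     i = 0
--     while i + 1 < n and c[i] >= c[i + 1]:
--         i += 1
--     while i + 1 < n and c[i] <= c[i + 1]:
--         i += 1
--     return 'Yes' if i == n - 1 else 'No'
-- ===== Notes on version B (the rewrite author's own statement) =====
-- stated objective: simpler
-- what changed: Replaced A's two-pointer greedy (running max, shrinking the window from both ends) by a single left-to-right scan that consumes the maximal non-increasing prefix and then the non-decreasing rest, answering Yes iff the scan reaches the last element.
import Mathlib
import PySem

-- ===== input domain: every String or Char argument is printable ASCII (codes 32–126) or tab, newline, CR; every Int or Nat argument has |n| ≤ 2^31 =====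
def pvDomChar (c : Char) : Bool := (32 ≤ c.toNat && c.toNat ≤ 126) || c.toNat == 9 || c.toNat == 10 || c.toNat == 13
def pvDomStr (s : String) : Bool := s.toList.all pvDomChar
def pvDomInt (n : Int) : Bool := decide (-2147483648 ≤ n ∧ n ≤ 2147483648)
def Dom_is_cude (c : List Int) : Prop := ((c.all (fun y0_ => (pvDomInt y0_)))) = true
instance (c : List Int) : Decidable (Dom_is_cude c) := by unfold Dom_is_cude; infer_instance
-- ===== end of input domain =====

-- B replaces A's two-pointer greedy (running max, shrink from both ends) by a single
-- left-to-right scan consuming the non-increasing prefix then the non-decreasing suffix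
-- (objective: simpler).

-- ===== PORT A =====
-- the for-loop of A: fuel = remaining iterations, state (head, last, current)
def pvLoopA (c : List Int) : Nat → Int → Int → Int → String
  | 0, _, _, _ => "Yes"
  | fuel + 1, head, last, current =>
    match PySem.List.pyGet? c head, PySem.List.pyGet? c last with
    | some ch, some cl =>
      if current < ch ∨ current < cl then "No"
      else if cl ≤ ch then pvLoopA c fuel (head + 1) last ch
      else pvLoopA c fuel head (last - 1) cl
    | _, _ => "No"  -- IndexError path; unreachable from is_cude under Pre_

def is_cude (c : List Int) : String :=
  match PySem.List.pyGet? c 0, PySem.List.pyGet? c (-1) with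
  | some c0, some clast =>
    let current := max c0 clast
    if current = c0 then pvLoopA c (c.length - 1) 1 ((c.length : Int) - 1) current
    else pvLoopA c (c.length - 1) 0 ((c.length : Int) - 2) current
  | _, _ => "No"  -- c[0] raises IndexError on []; excluded by Pre_

-- ===== PORT B =====
-- first while-loop of B: advance i while c[i] >= c[i+1]
def pvDownRun (c : List Int) (i : Nat) : Nat :=
  if h : i + 1 < c.length ∧ c.getD (i + 1) 0 ≤ c.getD i 0 then pvDownRun c (i + 1) else i
termination_by c.length - i
decreasing_by omega

-- second while-loop of B: advance i while c[i] <= c[i+1]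
def pvUpRun (c : List Int) (i : Nat) : Nat :=
  if h : i + 1 < c.length ∧ c.getD i 0 ≤ c.getD (i + 1) 0 then pvUpRun c (i + 1) else i
termination_by c.length - i
decreasing_by omega

def is_cude_alt (c : List Int) : String :=
  if (pvUpRun c (pvDownRun c 0) : Int) = (c.length : Int) - 1 then "Yes" else "No"

-- ===== PRECONDITION & SPEC =====
-- Pre_ excludes only the empty list, on which A raises IndexError (c[0]).
def Pre_is_cude (c : List Int) : Prop := c ≠ []
instance (c : List Int) : Decidable (Pre_is_cude c) := by unfold Pre_is_cude; infer_instance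
def pvWitness_is_cude : List Int := [3, 2, 1, 2, 5]
def Spec_is_cude (c : List Int) (out : String) : Prop := out = is_cude_alt c
instance (c : List Int) (out : String) : Decidable (Spec_is_cude c out) := by unfold Spec_is_cude; infer_instance

-- ===== CLAIM (what is proved, stated in full; the proofs are below) =====
def Claim_equal_is_cude : Prop := ∀ (c : List Int), Dom_is_cude c → Pre_is_cude c → Spec_is_cude c (is_cude c)

-- ===== LEMMAS AND PROOFS =====

-- element access used throughout the proofs (indices are always in range where used)
def pvG (c : List Int) (j : Int) : Int := c.getD j.toNat 0

-- the invariant of A's loop: the window c[head..last] is a valley whose ends are ≤ current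
def pvCond (c : List Int) (head last current : Int) : Prop :=
  last < head ∨
  (pvG c head ≤ current ∧ pvG c last ≤ current ∧
   ∃ m : Int, head ≤ m ∧ m ≤ last ∧
     (∀ j : Int, head ≤ j → j < m → pvG c (j + 1) ≤ pvG c j) ∧
     (∀ j : Int, m ≤ j → j < last → pvG c j ≤ pvG c (j + 1)))

-- the whole list is a non-increasing prefix followed by a non-decreasing suffix
def pvValley (c : List Int) : Prop :=
  ∃ m : Int, 0 ≤ m ∧ m ≤ (c.length : Int) - 1 ∧
    (∀ j : Int, 0 ≤ j → j < m → pvG c (j + 1) ≤ pvG c j) ∧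
    (∀ j : Int, m ≤ j → j < (c.length : Int) - 1 → pvG c j ≤ pvG c (j + 1))

lemma pvChainUp (c : List Int) (m last : Int)
    (h : ∀ j : Int, m ≤ j → j < last → pvG c j ≤ pvG c (j + 1)) :
    ∀ a b : Int, m ≤ a → a ≤ b → b ≤ last → pvG c a ≤ pvG c b := by
  intro a b ha hab hbl
  induction b, hab using Int.le_induction with
  | base => exact le_refl _
  | succ n hn ih =>
    exact le_trans (ih (by omega)) (h n (by omega) (by omega))

lemma pvChainDown (c : List Int) (head m : Int)
    (h : ∀ j : Int, head ≤ j → j < m → pvG c (j + 1) ≤ pvG c j) :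
    ∀ a b : Int, head ≤ a → a ≤ b → b ≤ m → pvG c b ≤ pvG c a := by
  intro a b ha hab hbm
  induction b, hab using Int.le_induction with
  | base => exact le_refl _
  | succ n hn ih =>
    exact le_trans (h n (by omega) (by omega)) (ih (by omega))

lemma pvGet_in (c : List Int) (i : Int) (h0 : 0 ≤ i) (h1 : i < (c.length : Int)) :
    PySem.List.pyGet? c i = some (pvG c i) := by
  rw [PySem.List.pyGet?_eq_some_getElem c h0 h1]
  unfold pvG
  rw [List.getD_eq_getElem _ _ (by omega)]

lemma pvGet_neg1 (c : List Int) (h : 1 ≤ c.length) :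
    PySem.List.pyGet? c (-1) = some (pvG c ((c.length : Int) - 1)) := by
  rw [PySem.List.pyGet?_neg_ofNat c 1 (by omega) (by omega)]
  unfold pvG
  rw [List.getElem?_eq_getElem (by omega), List.getD_eq_getElem _ _ (by omega)]
  congr 1
  congr 1
  omega

lemma pvStepHead (c : List Int) (head last current : Int)
    (h0 : 0 ≤ head) (hhl : head ≤ last)
    (hch : pvG c head ≤ current) (hcl : pvG c last ≤ current)
    (hc : pvG c last ≤ pvG c head) :
    pvCond c (head + 1) last (pvG c head) ↔ pvCond c head last current := by
  unfold pvCond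
  constructor
  · rintro (h | ⟨h1, h2, m, hm1, hm2, hdown, hup⟩)
    · -- window was a single element: head = last
      exact Or.inr ⟨hch, hcl, head, le_refl _, hhl,
        fun j hj1 hj2 => by omega, fun j hj1 hj2 => by omega⟩
    · refine Or.inr ⟨hch, hcl, m, by omega, hm2, ?_, hup⟩
      intro j hj1 hj2
      rcases eq_or_lt_of_le hj1 with heq | hj
      · rw [← heq]; exact h1
      · exact hdown j (by omega) hj2
  · rintro (h | ⟨h1, h2, m, hm1, hm2, hdown, hup⟩)
    · omega
    · by_cases hm : head + 1 ≤ m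
      · exact Or.inr ⟨hdown head (le_refl _) (by omega), hc, m, hm, hm2,
          fun j hj1 hj2 => hdown j (by omega) hj2, hup⟩
      · -- m = head: the whole window is non-decreasing, hence constant
        have hm0 : m = head := by omega
        subst hm0
        by_cases hml : m = last
        · exact Or.inl (by omega)
        · have he1 : pvG c m ≤ pvG c (m + 1) := hup m (le_refl _) (by omega)
          have he2 : pvG c (m + 1) ≤ pvG c last :=
            pvChainUp c m last hup (m + 1) last (by omega) (by omega) (le_refl _)
          refine Or.inr ⟨?_, ?_, m + 1, le_refl _, by omega,
            fun j hj1 hj2 => by omega, fun j hj1 hj2 => hup j (by omega) hj2⟩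
          · omega
          · omega

lemma pvStepLast (c : List Int) (head last current : Int)
    (h0 : 0 ≤ head) (hhl : head ≤ last)
    (hch : pvG c head ≤ current) (hcl : pvG c last ≤ current)
    (hc : pvG c head < pvG c last) :
    pvCond c head (last - 1) (pvG c last) ↔ pvCond c head last current := by
  unfold pvCond
  constructor
  · rintro (h | ⟨h1, h2, m, hm1, hm2, hdown, hup⟩)
    · -- head = last
      exact Or.inr ⟨hch, hcl, head, le_refl _, hhl,
        fun j hj1 hj2 => by omega, fun j hj1 hj2 => by omega⟩
    · refine Or.inr ⟨hch, hcl, m, hm1, by omega, hdown, ?_⟩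
      intro j hj1 hj2
      rcases eq_or_lt_of_le (show j ≤ last - 1 by omega) with heq | hj
      · rw [heq]
        have : last - 1 + 1 = last := by omega
        rw [this]
        exact h2
      · exact hup j hj1 (by omega)
  · rintro (h | ⟨h1, h2, m, hm1, hm2, hdown, hup⟩)
    · omega
    · by_cases hm : m ≤ last - 1
      · refine Or.inr ⟨by omega, ?_, m, hm1, hm, hdown,
          fun j hj1 hj2 => hup j hj1 (by omega)⟩
        have : pvG c (last - 1) ≤ pvG c (last - 1 + 1) := hup (last - 1) (by omega) (by omega)
        have h2 : last - 1 + 1 = last := by omega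
        rw [h2] at this
        exact this
      · -- m = last: the whole window is non-increasing, contradicting hc
        have hm0 : m = last := by omega
        have hcd := pvChainDown c head m hdown head m (le_refl _) (by omega) (le_refl _)
        rw [hm0] at hcd
        omega

lemma pvLoopA_yes (c : List Int) : ∀ (fuel : Nat) (head last current : Int),
    0 ≤ head → head + (fuel : Int) = last + 1 → last < (c.length : Int) →
    (pvLoopA c fuel head last current = "Yes" ↔ pvCond c head last current) := by
  intro fuel
  induction fuel with
  | zero =>
    intro head last current h0 hf hl
    exact ⟨fun _ => Or.inl (by omega), fun _ => rfl⟩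
  | succ n ih =>
    intro head last current h0 hf hl
    have hhl : head ≤ last := by omega
    rw [pvLoopA, pvGet_in c head h0 (by omega), pvGet_in c last (by omega) hl]
    simp only
    split
    · rename_i htop
      constructor
      · intro h; exact absurd h (by decide)
      · rintro (h | ⟨h1, h2, _⟩) <;> omega
    · rename_i htop
      push_neg at htop
      obtain ⟨hch, hcl⟩ := htop
      split
      · rename_i hc
        rw [ih (head + 1) last (pvG c head) (by omega) (by omega) hl]
        exact pvStepHead c head last current h0 hhl hch hcl hc
      · rename_i hc
        push_neg at hc
        rw [ih head (last - 1) (pvG c last) h0 (by omega) (by omega)]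
        exact pvStepLast c head last current h0 hhl hch hcl hc

lemma pvCond_zero (c : List Int) (hlen : 1 ≤ c.length) (cur : Int)
    (h1 : pvG c 0 ≤ cur) (h2 : pvG c ((c.length : Int) - 1) ≤ cur) :
    pvCond c 0 ((c.length : Int) - 1) cur ↔ pvValley c := by
  unfold pvCond pvValley
  constructor
  · rintro (h | ⟨_, _, m, hm⟩)
    · omega
    · exact ⟨m, hm⟩
  · rintro ⟨m, hm⟩
    exact Or.inr ⟨h1, h2, m, hm⟩

lemma pvA_yes (c : List Int) (h : c ≠ []) : is_cude c = "Yes" ↔ pvValley c := by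
  have hlen : 1 ≤ c.length := by cases c <;> simp_all
  unfold is_cude
  rw [pvGet_in c 0 (by omega) (by omega), pvGet_neg1 c hlen]
  simp only
  set c0 := pvG c 0 with hc0
  set cl := pvG c ((c.length : Int) - 1) with hcl
  split
  · rename_i hmax
    have hle : cl ≤ c0 := by
      rcases le_total cl c0 with h' | h'
      · exact h'
      · rw [max_eq_right h'] at hmax; omega
    have hmaxe : max c0 cl = c0 := max_eq_left hle
    rw [hmaxe, pvLoopA_yes c (c.length - 1) 1 ((c.length : Int) - 1) c0 (by omega)
      (by omega) (by omega)]
    by_cases h1 : c.length = 1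
    · constructor
      · intro _
        exact ⟨0, by omega, by omega, fun j hj1 hj2 => by omega, fun j hj1 hj2 => by omega⟩
      · intro _
        unfold pvCond
        exact Or.inl (by omega)
    · have hbr := pvStepHead c 0 ((c.length : Int) - 1) c0 (by omega) (by omega) (le_refl _) hle hle
      rw [show (0 : Int) + 1 = 1 by ring] at hbr
      rw [hbr]
      exact pvCond_zero c hlen c0 (le_refl _) hle
  · rename_i hmax
    have hlt : c0 < cl := by
      rcases le_total cl c0 with h' | h'
      · rw [max_eq_left h'] at hmax; omega
      · rcases lt_or_eq_of_le h' with h'' | h''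
        · exact h''
        · rw [h'', max_self] at hmax; omega
    have hlen2 : 2 ≤ c.length := by
      by_contra hh
      have : c.length = 1 := by omega
      have : ((c.length : Int) - 1) = 0 := by omega
      rw [this] at hcl
      omega
    have hmaxe : max c0 cl = cl := max_eq_right hlt.le
    rw [hmaxe, pvLoopA_yes c (c.length - 1) 0 ((c.length : Int) - 2) cl (by omega)
      (by omega) (by omega)]
    rw [show ((c.length : Int) - 2) = ((c.length : Int) - 1) - 1 by ring,
      pvStepLast c 0 ((c.length : Int) - 1) cl (by omega) (by omega) hlt.le (le_refl _) hlt]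
    exact pvCond_zero c hlen cl hlt.le (le_refl _)

lemma pvG_nat (c : List Int) (j : Nat) : pvG c (j : Int) = c.getD j 0 := by
  unfold pvG
  simp

lemma pvDownRun_props (c : List Int) : ∀ (k i : Nat), c.length - i ≤ k →
    i ≤ pvDownRun c i ∧
    (i < c.length → pvDownRun c i < c.length) ∧
    (∀ j, i ≤ j → j < pvDownRun c i → c.getD (j + 1) 0 ≤ c.getD j 0) ∧
    (pvDownRun c i + 1 < c.length → ¬ c.getD (pvDownRun c i + 1) 0 ≤ c.getD (pvDownRun c i) 0) := by
  intro k
  induction k with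
  | zero =>
    intro i hk
    rw [pvDownRun]
    have hcond : ¬ (i + 1 < c.length ∧ c.getD (i + 1) 0 ≤ c.getD i 0) := by
      intro ⟨h1, _⟩; omega
    rw [dif_neg hcond]
    exact ⟨le_refl _, by omega, fun j hj1 hj2 => by omega, fun h1 h2 => hcond ⟨by omega, h2⟩⟩
  | succ n ih =>
    intro i hk
    rw [pvDownRun]
    by_cases hcond : i + 1 < c.length ∧ c.getD (i + 1) 0 ≤ c.getD i 0
    · rw [dif_pos hcond]
      obtain ⟨ih1, ih2, ih3, ih4⟩ := ih (i + 1) (by omega)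
      refine ⟨by omega, fun _ => ih2 hcond.1, ?_, ih4⟩
      intro j hj1 hj2
      rcases Nat.eq_or_lt_of_le hj1 with heq | hlt
      · rw [← heq]; exact hcond.2
      · exact ih3 j hlt hj2
    · rw [dif_neg hcond]
      exact ⟨le_refl _, by omega, fun j hj1 hj2 => by omega, fun h1 h2 => hcond ⟨by omega, h2⟩⟩

lemma pvUpRun_props (c : List Int) : ∀ (k i : Nat), c.length - i ≤ k →
    i ≤ pvUpRun c i ∧
    (i < c.length → pvUpRun c i < c.length) ∧
    (∀ j, i ≤ j → j < pvUpRun c i → c.getD j 0 ≤ c.getD (j + 1) 0) ∧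
    (pvUpRun c i + 1 < c.length → ¬ c.getD (pvUpRun c i) 0 ≤ c.getD (pvUpRun c i + 1) 0) := by
  intro k
  induction k with
  | zero =>
    intro i hk
    rw [pvUpRun]
    have hcond : ¬ (i + 1 < c.length ∧ c.getD i 0 ≤ c.getD (i + 1) 0) := by
      intro ⟨h1, _⟩; omega
    rw [dif_neg hcond]
    exact ⟨le_refl _, by omega, fun j hj1 hj2 => by omega, fun h1 h2 => hcond ⟨by omega, h2⟩⟩
  | succ n ih =>
    intro i hk
    rw [pvUpRun]
    by_cases hcond : i + 1 < c.length ∧ c.getD i 0 ≤ c.getD (i + 1) 0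
    · rw [dif_pos hcond]
      obtain ⟨ih1, ih2, ih3, ih4⟩ := ih (i + 1) (by omega)
      refine ⟨by omega, fun _ => ih2 hcond.1, ?_, ih4⟩
      intro j hj1 hj2
      rcases Nat.eq_or_lt_of_le hj1 with heq | hlt
      · rw [← heq]; exact hcond.2
      · exact ih3 j hlt hj2
    · rw [dif_neg hcond]
      exact ⟨le_refl _, by omega, fun j hj1 hj2 => by omega, fun h1 h2 => hcond ⟨by omega, h2⟩⟩

lemma pvB_yes (c : List Int) (h : c ≠ []) : is_cude_alt c = "Yes" ↔ pvValley c := by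
  have hlen : 1 ≤ c.length := by cases c <;> simp_all
  obtain ⟨hd1, hd2, hd3, hd4⟩ := pvDownRun_props c c.length 0 (by omega)
  set d := pvDownRun c 0 with hd
  obtain ⟨hu1, hu2, hu3, hu4⟩ := pvUpRun_props c c.length d (by omega)
  set u := pvUpRun c d with hu
  have hdlen : d < c.length := hd2 (by omega)
  have hulen : u < c.length := hu2 hdlen
  unfold is_cude_alt
  rw [← hd, ← hu]
  constructor
  · intro hyes
    have heq : (u : Int) = (c.length : Int) - 1 := by
      by_contra hne
      rw [if_neg hne] at hyes
      exact absurd hyes (by decide)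
    refine ⟨(d : Int), by omega, by omega, ?_, ?_⟩
    · intro j hj1 hj2
      have hj : j = ((j.toNat : Nat) : Int) := by omega
      rw [hj, show ((j.toNat : Nat) : Int) + 1 = ((j.toNat + 1 : Nat) : Int) by push_cast; ring,
        pvG_nat, pvG_nat]
      exact hd3 j.toNat (by omega) (by omega)
    · intro j hj1 hj2
      have hj : j = ((j.toNat : Nat) : Int) := by omega
      rw [hj, show ((j.toNat : Nat) : Int) + 1 = ((j.toNat + 1 : Nat) : Int) by push_cast; ring,
        pvG_nat, pvG_nat]
      exact hu3 j.toNat (by omega) (by omega)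
  · rintro ⟨m, hm0, hm1, hdown, hup⟩
    have hmd : m ≤ (d : Int) := by
      by_contra hh
      push_neg at hh
      have hd1len : d + 1 < c.length := by omega
      refine hd4 hd1len ?_
      have := hdown (d : Int) (by omega) hh
      rw [show ((d : Nat) : Int) + 1 = ((d + 1 : Nat) : Int) by push_cast; ring,
        pvG_nat, pvG_nat] at this
      exact this
    have hueq : u = c.length - 1 := by
      by_contra hh
      have hu1len : u + 1 < c.length := by omega
      refine hu4 hu1len ?_
      have := hup (u : Int) (by omega) (by omega)
      rw [show ((u : Nat) : Int) + 1 = ((u + 1 : Nat) : Int) by push_cast; ring,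
        pvG_nat, pvG_nat] at this
      exact this
    rw [if_pos (by omega)]

lemma pvLoopA_range (c : List Int) : ∀ (fuel : Nat) (head last current : Int),
    pvLoopA c fuel head last current = "Yes" ∨ pvLoopA c fuel head last current = "No" := by
  intro fuel
  induction fuel with
  | zero => intro h l cur; exact Or.inl rfl
  | succ n ih =>
    intro h l cur
    rw [pvLoopA]
    rcases PySem.List.pyGet? c h with _ | ch
    · exact Or.inr rfl
    · rcases PySem.List.pyGet? c l with _ | cl
      · exact Or.inr rfl
      · simp only
        split
        · exact Or.inr rfl
        · split
          · exact ih _ _ _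
          · exact ih _ _ _

lemma pvA_range (c : List Int) : is_cude c = "Yes" ∨ is_cude c = "No" := by
  unfold is_cude
  rcases PySem.List.pyGet? c 0 with _ | c0
  · exact Or.inr rfl
  · rcases PySem.List.pyGet? c (-1) with _ | cl
    · exact Or.inr rfl
    · simp only
      split
      · exact pvLoopA_range c _ _ _ _
      · exact pvLoopA_range c _ _ _ _

lemma pvB_range (c : List Int) : is_cude_alt c = "Yes" ∨ is_cude_alt c = "No" := by
  unfold is_cude_alt
  split
  · exact Or.inl rfl
  · exact Or.inr rfl

-- ===== VERDICT (by name: the statement is the Claim_ definition above) =====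
theorem is_cude_spec : Claim_equal_is_cude := by
  intro c _ hpre
  unfold Spec_is_cude
  rcases pvA_range c with ha | ha <;> rcases pvB_range c with hb | hb <;> rw [ha, hb]
  · exact absurd ((pvB_yes c hpre).2 ((pvA_yes c hpre).1 ha)) (by simp [hb])
  · exact absurd ((pvA_yes c hpre).2 ((pvB_yes c hpre).1 hb)) (by simp [ha])
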